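-- pv_equiv track=rewrite | github.com/Thanmai-DL/AutomateBoringStuff | Cold Email/compose.py | recipient
-- ===== SOURCE A (Python) =====
-- def recipient(first, middle, last, domain):
--     f, m, l = [], [], []
--     f.append(first);f.append(first[0])
--     l.append(last);l.append(last[0])
--     sep = '.'
--     d = '@' + domain
--     comb = []
--     for i in f:
--         for k in l:
--             if not (len(i) == 1 and len(k) == 1):
--                 comb.append(i + k + d)
--                 comb.append(i + sep + k + d)
--                 comb.append(k + i + d)
--                 comb.append(k + sep + i + d)
--     if middle != 'N/A':
--         m.append(middle);m.append(middle[0])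
--         for i in f:
--             for j in m:
--                 for k in l:
--                     if not (len(i) == 1 and len(k) == 1):
--                         comb.append(i + j + k + d)
--                         comb.append(i + sep + j + sep + k + d)
--                         comb.append(i + sep + j + k + d)
--                         comb.append(i + j + sep + k + d)
--                         comb.append(j + i + k + d)
--                         comb.append(j + sep + i + sep + k + d)
--                         comb.append(j + sep + i + k + d)
--                         comb.append(j + i + sep + k + d)
--                         comb.append(k + i + j + d)
--                         comb.append(k + sep + i + sep + j + d)
--                         comb.append(k + sep + i + j + d)
--                         comb.append(k + i + sep + j + d)
--     comb.sort()
--     return ",".join(comb)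
-- ===== SOURCE B (Python) =====
-- def recipient(first, middle, last, domain):
--     # Recursively interleave '' / '.' separators between ordered name parts,
--     # reuse the filtered (first-part, last-part) pairs for both stages,
--     # and attach '@domain' once at the end.
--     def variants(parts):
--         if len(parts) == 1:
--             return parts[:]
--         return [parts[0] + s + r for s in ('', '.') for r in variants(parts[1:])]
--
--     f = [first, first[0]]
--     l = [last, last[0]]
--     pairs = [(i, k) for i in f for k in l if not (len(i) == 1 and len(k) == 1)]
--     comb = []
--     for i, k in pairs:
--         comb += variants([i, k]) + variants([k, i])
--     if middle != 'N/A':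
--         m = [middle, middle[0]]
--         for i, k in pairs:
--             for j in m:
--                 comb += variants([i, j, k]) + variants([j, i, k]) + variants([k, i, j])
--     return ",".join(sorted(x + '@' + domain for x in comb))
-- ===== Notes on version B (the rewrite author's own statement) =====
-- stated objective: alternative
-- what changed: replaces A's hand-unrolled per-pattern appends with a recursive separator-interleaving function applied to orderings of name parts, precomputes the guard-filtered (first-part,last-part) pairs once and reuses them for both the two-part and three-part stages, and attaches '@'+domain in a single final pass instead of inside every append
import Mathlib
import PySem

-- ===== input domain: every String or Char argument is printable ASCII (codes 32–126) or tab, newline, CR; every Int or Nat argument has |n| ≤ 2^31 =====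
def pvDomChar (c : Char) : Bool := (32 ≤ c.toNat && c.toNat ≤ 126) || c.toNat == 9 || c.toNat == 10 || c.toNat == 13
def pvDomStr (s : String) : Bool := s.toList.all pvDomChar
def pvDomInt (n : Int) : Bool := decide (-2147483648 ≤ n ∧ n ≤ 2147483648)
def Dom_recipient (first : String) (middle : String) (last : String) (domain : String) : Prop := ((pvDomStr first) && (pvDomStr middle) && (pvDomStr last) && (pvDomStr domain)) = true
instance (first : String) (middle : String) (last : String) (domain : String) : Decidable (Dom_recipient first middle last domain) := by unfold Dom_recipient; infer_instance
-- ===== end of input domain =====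

-- B builds emails by recursively interleaving separators into part orderings, reusing the
-- guard-filtered (first-part,last-part) pairs for both stages and attaching the domain once
-- at the end (objective: alternative decomposition, same cost).

-- ===== PORT A =====
-- first[0] as a 1-char string; Pre_ excludes the empty string, where Python raises IndexError (pyGet? = none)
def pvHeadStr (s : String) : String := ((PySem.Str.pyGet? s 0).map (fun c => String.ofList [c])).getD ""

def recipient (first : String) (middle : String) (last : String) (domain : String) : String :=
  let f : List String := [first, pvHeadStr first]
  let l : List String := [last, pvHeadStr last]
  let sep : String := "."
  let d : String := "@" ++ domain
  let comb : List String :=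
    f.foldl (fun comb i =>
      l.foldl (fun comb k =>
        if ¬ (PySem.Str.len i = 1 ∧ PySem.Str.len k = 1) then
          comb ++ [i ++ k ++ d, i ++ sep ++ k ++ d, k ++ i ++ d, k ++ sep ++ i ++ d]
        else comb) comb) []
  let comb : List String :=
    if middle ≠ "N/A" then
      let m : List String := [middle, pvHeadStr middle]
      f.foldl (fun comb i =>
        m.foldl (fun comb j =>
          l.foldl (fun comb k =>
            if ¬ (PySem.Str.len i = 1 ∧ PySem.Str.len k = 1) then
              comb ++ [i ++ j ++ k ++ d, i ++ sep ++ j ++ sep ++ k ++ d, i ++ sep ++ j ++ k ++ d, i ++ j ++ sep ++ k ++ d,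
                       j ++ i ++ k ++ d, j ++ sep ++ i ++ sep ++ k ++ d, j ++ sep ++ i ++ k ++ d, j ++ i ++ sep ++ k ++ d,
                       k ++ i ++ j ++ d, k ++ sep ++ i ++ sep ++ j ++ d, k ++ sep ++ i ++ j ++ d, k ++ i ++ sep ++ j ++ d]
            else comb) comb) comb) comb
    else comb
  PySem.Str.join "," (PySem.List.sorted comb (fun x => x) false)

-- ===== PORT B =====
-- recursive separator interleaving: variants(parts) in Source B
def pvVariants : List String → List String
  | [] => []
  | [p] => [p]
  | p :: q :: rest =>
      (["", "."] : List String).flatMap (fun s => (pvVariants (q :: rest)).map (fun r => p ++ s ++ r))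

def recipient_alt (first : String) (middle : String) (last : String) (domain : String) : String :=
  let f : List String := [first, pvHeadStr first]
  let l : List String := [last, pvHeadStr last]
  let pairs : List (String × String) :=
    f.flatMap (fun i => l.flatMap (fun k =>
      if ¬ (PySem.Str.len i = 1 ∧ PySem.Str.len k = 1) then [(i, k)] else []))
  let comb : List String :=
    pairs.foldl (fun acc p => acc ++ (pvVariants [p.1, p.2] ++ pvVariants [p.2, p.1])) []
  let comb : List String :=
    if middle ≠ "N/A" then
      let m : List String := [middle, pvHeadStr middle]
      pairs.foldl (fun acc p =>
        m.foldl (fun acc j =>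
          acc ++ (pvVariants [p.1, j, p.2] ++ pvVariants [j, p.1, p.2] ++ pvVariants [p.2, p.1, j])) acc) comb
    else comb
  PySem.Str.join "," (PySem.List.sorted (comb.map (fun x => x ++ ("@" ++ domain))) (fun x => x) false)

-- ===== PRECONDITION & SPEC =====
-- Pre_ excludes only inputs where the Python A raises IndexError (first[0]/last[0]/middle[0] on an empty string); B raises there too.
def Pre_recipient (first : String) (middle : String) (last : String) (domain : String) : Prop :=
  first ≠ "" ∧ last ≠ "" ∧ (middle ≠ "N/A" → middle ≠ "")
instance (first : String) (middle : String) (last : String) (domain : String) : Decidable (Pre_recipient first middle last domain) := by unfold Pre_recipient; infer_instance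

def pvWitness_recipient : String × String × String × String := ("jo", "N/A", "doe", "mail.com")

def Spec_recipient (first : String) (middle : String) (last : String) (domain : String) (out : String) : Prop := out = recipient_alt first middle last domain
instance (first : String) (middle : String) (last : String) (domain : String) (out : String) : Decidable (Spec_recipient first middle last domain out) := by unfold Spec_recipient; infer_instance

-- ===== CLAIM (what is proved, stated in full; the proofs are below) =====
def Claim_equal_recipient : Prop := ∀ (first : String) (middle : String) (last : String) (domain : String), Dom_recipient first middle last domain → Pre_recipient first middle last domain → Spec_recipient first middle last domain (recipient first middle last domain)

-- ===== LEMMAS AND PROOFS =====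

lemma pvFoldIf {α γ : Type} (l : List α) (p : α → Prop) [DecidablePred p] (g : α → List γ) (acc : List γ) :
    l.foldl (fun acc x => if p x then acc ++ g x else acc) acc
      = acc ++ l.flatMap (fun x => if p x then g x else []) := by
  induction l generalizing acc with
  | nil => simp
  | cons x t ih => by_cases h : p x <;> simp [h, ih, List.append_assoc]

lemma pvFold2 {α β γ : Type} (f : List α) (l : List β) (p : α → β → Prop)
    [∀ i k, Decidable (p i k)] (g : α → β → List γ) (acc : List γ) :
    f.foldl (fun c i => l.foldl (fun c k => if p i k then c ++ g i k else c) c) acc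
      = acc ++ f.flatMap (fun i => l.flatMap (fun k => if p i k then g i k else [])) := by
  induction f generalizing acc with
  | nil => simp
  | cons i t ih => simp [pvFoldIf, ih, List.flatMap_def, List.append_assoc]

lemma pvPerm4 {α : Type} (a b c d : α) {t1 t2 : List α} (h : t1.Perm t2) :
    (a :: b :: c :: d :: t1).Perm (a :: d :: c :: b :: t2) :=
  List.Perm.cons a (((List.reverse_perm [b, c, d]).symm).append h)

lemma pvFlatMapIf {α γ : Type} (c : Prop) [Decidable c] (x : α) (g : α → List γ) :
    (if c then [x] else []).flatMap g = if c then g x else [] := by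
  split_ifs <;> simp

lemma pvSwapT (c1 c2 : Prop) [Decidable c1] [Decidable c2]
    (a1 a2 a3 a4 b13 b24 t1 t2 : List String)
    (h13 : (a1 ++ a3).Perm b13) (h24 : (a2 ++ a4).Perm b24) (ht : t1.Perm t2) :
    ((if c1 then a1 else []) ++ ((if c2 then a2 else []) ++ ((if c1 then a3 else []) ++ ((if c2 then a4 else []) ++ t1)))).Perm
      ((if c1 then b13 else []) ++ ((if c2 then b24 else []) ++ t2)) := by
  by_cases h1 : c1 <;> by_cases h2 : c2 <;>
    simp only [h1, h2, ite_true, ite_false, List.nil_append]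
  · refine (((List.perm_append_comm_assoc a2 a3 (a4 ++ t1)).append_left a1).trans ?_)
    have : a1 ++ (a3 ++ (a2 ++ (a4 ++ t1))) = (a1 ++ a3) ++ ((a2 ++ a4) ++ t1) := by
      simp [List.append_assoc]
    rw [this]
    exact h13.append (h24.append ht)
  · simpa [List.append_assoc] using h13.append ht
  · simpa [List.append_assoc] using h24.append ht
  · exact ht

lemma pvSwap (c1 c2 : Prop) [Decidable c1] [Decidable c2]
    (a1 a2 a3 a4 b13 b24 : List String)
    (h13 : (a1 ++ a3).Perm b13) (h24 : (a2 ++ a4).Perm b24) :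
    ((if c1 then a1 else []) ++ ((if c2 then a2 else []) ++ ((if c1 then a3 else []) ++ (if c2 then a4 else [])))).Perm
      ((if c1 then b13 else []) ++ (if c2 then b24 else [])) := by
  have := pvSwapT c1 c2 a1 a2 a3 a4 b13 b24 [] [] h13 h24 (List.Perm.refl [])
  simpa using this

-- A's 12 three-part emails for one ordering tuple vs B's 12 (pvVariants order): swap the 2nd and 4th of each 4-block
lemma pvBlk (i j k d : String) :
    ([i ++ (j ++ (k ++ d)), i ++ ("." ++ (j ++ ("." ++ (k ++ d)))), i ++ ("." ++ (j ++ (k ++ d))), i ++ (j ++ ("." ++ (k ++ d))),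
      j ++ (i ++ (k ++ d)), j ++ ("." ++ (i ++ ("." ++ (k ++ d)))), j ++ ("." ++ (i ++ (k ++ d))), j ++ (i ++ ("." ++ (k ++ d))),
      k ++ (i ++ (j ++ d)), k ++ ("." ++ (i ++ ("." ++ (j ++ d)))), k ++ ("." ++ (i ++ (j ++ d))), k ++ (i ++ ("." ++ (j ++ d)))]).Perm
    [i ++ (j ++ (k ++ d)), i ++ (j ++ ("." ++ (k ++ d))), i ++ ("." ++ (j ++ (k ++ d))), i ++ ("." ++ (j ++ ("." ++ (k ++ d)))),
     j ++ (i ++ (k ++ d)), j ++ (i ++ ("." ++ (k ++ d))), j ++ ("." ++ (i ++ (k ++ d))), j ++ ("." ++ (i ++ ("." ++ (k ++ d)))),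
     k ++ (i ++ (j ++ d)), k ++ (i ++ ("." ++ (j ++ d))), k ++ ("." ++ (i ++ (j ++ d))), k ++ ("." ++ (i ++ ("." ++ (j ++ d))))] :=
  pvPerm4 _ _ _ _ (pvPerm4 _ _ _ _ (pvPerm4 _ _ _ _ List.Perm.nil))

-- ===== VERDICT (by name: the statement is the Claim_ definition above) =====
set_option maxHeartbeats 4000000 in
theorem recipient_spec : Claim_equal_recipient := by
  intro first middle last domain _ _
  unfold Spec_recipient recipient recipient_alt
  simp only [pvFold2, PySem.List.foldl_append_eq_flatMap, List.nil_append]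
  refine congrArg _ (PySem.List.sorted_eq_sorted_of_perm _ _ _ (fun a b h => h) ?_)
  by_cases hm : middle = "N/A" <;>
    simp only [hm, ne_eq, not_true_eq_false, not_false_eq_true, ite_true, ite_false,
      List.map_append, List.map_flatMap, List.flatMap_append, List.flatMap_cons, List.flatMap_nil,
      pvVariants, pvFlatMapIf, List.map_cons, List.map_nil, List.append_nil,
      String.append_empty, String.empty_append,
      List.append_assoc, String.append_assoc, apply_ite (List.map (fun x => x ++ ("@" ++ domain)))]
  · exact List.Perm.refl _
  · refine List.Perm.append_left _ (List.Perm.append_left _ (List.Perm.append_left _ (List.Perm.append_left _ ?_)))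
    refine pvSwapT _ _ _ _ _ _ _ _ _ _ ?_ ?_ ?_
    · exact (pvBlk _ _ _ _).append (pvBlk _ _ _ _)
    · exact (pvBlk _ _ _ _).append (pvBlk _ _ _ _)
    refine pvSwap _ _ _ _ _ _ _ _ ?_ ?_
    · exact (pvBlk _ _ _ _).append (pvBlk _ _ _ _)
    · exact (pvBlk _ _ _ _).append (pvBlk _ _ _ _)
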